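-- pv_equiv track=rewrite | github.com/Zzpecter/Codewars | TVRemote.py | tv_remote
-- ===== SOURCE A (Python) =====
-- REMOTE = [['a', 'b', 'c', 'd', 'e', '1', '2', '3'],
--           ['f', 'g', 'h', 'i', 'j', '4', '5', '6'],
--           ['k', 'l', 'm', 'n', 'o', '7', '8', '9'],
--           ['p', 'q', 'r', 's', 't', '.', '@', '0'],
--           ['u', 'v', 'w', 'x', 'y', 'z', '_', '/']]
--
-- def get_indexes(letter):
--     for index, row in enumerate(REMOTE):
--         if letter in row:
--             return index, row.index(letter)
--
-- def tv_remote(word):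
--     x_indexes = []
--     y_indexes = []
--
--     for letter in word:
--         new_y, new_x = get_indexes(letter)
--         x_indexes.append((new_x))
--         y_indexes.append((new_y))
--
--     current_x = 0
--     current_y = 0
--     moves = 0
--
--     for _ in range(len(x_indexes)):
--         new_x = x_indexes.pop(0)
--         new_y = y_indexes.pop(0)
--
--         moves_x = new_x - current_x
--         moves_y = new_y - current_y
--
--         moves += moves_x if moves_x >= 0 else moves_x * -1
--         moves += moves_y if moves_y >= 0 else moves_y * -1
--
--         current_y = new_y
--         current_x = new_x
--         moves += 1
--     return moves
-- ===== SOURCE B (Python) =====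
-- REMOTE = [['a', 'b', 'c', 'd', 'e', '1', '2', '3'],
--           ['f', 'g', 'h', 'i', 'j', '4', '5', '6'],
--           ['k', 'l', 'm', 'n', 'o', '7', '8', '9'],
--           ['p', 'q', 'r', 's', 't', '.', '@', '0'],
--           ['u', 'v', 'w', 'x', 'y', 'z', '_', '/']]
--
-- POS = {ch: (r, c) for r, row in enumerate(REMOTE) for c, ch in enumerate(row)}
--
-- def tv_remote(word):
--     positions = [(0, 0)] + [POS[ch] for ch in word]
--     travel = sum(abs(r2 - r1) + abs(c2 - c1)
--                  for (r1, c1), (r2, c2) in zip(positions, positions[1:]))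
--     return travel + len(word)
-- ===== Notes on version B (the rewrite author's own statement) =====
-- stated objective: faster
-- what changed: Replaces the two parallel index lists consumed by pop(0) and the mutable cursor state with a position dict built once and a single pairwise sum of Manhattan distances over consecutive positions plus len(word).
import Mathlib
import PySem

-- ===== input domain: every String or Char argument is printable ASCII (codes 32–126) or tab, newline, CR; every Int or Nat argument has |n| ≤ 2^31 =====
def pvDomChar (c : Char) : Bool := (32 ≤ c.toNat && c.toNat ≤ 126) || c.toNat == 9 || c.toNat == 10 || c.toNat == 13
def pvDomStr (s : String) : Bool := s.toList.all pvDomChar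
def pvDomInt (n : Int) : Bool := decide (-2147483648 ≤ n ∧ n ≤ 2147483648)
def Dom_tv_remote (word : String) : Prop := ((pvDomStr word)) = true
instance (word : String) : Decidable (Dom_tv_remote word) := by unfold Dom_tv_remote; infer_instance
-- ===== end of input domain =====

set_option maxRecDepth 8000


-- B replaces the parallel index lists, pop(0) consumption and mutable cursor of A with a
-- prebuilt position table followed by a pairwise Manhattan-distance sum; A's pop(0) is linear per step, B is one pass (objective: faster, measured).

-- ===== PORT A =====
def pvREMOTE : List (List Char) :=
  [['a', 'b', 'c', 'd', 'e', '1', '2', '3'],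
   ['f', 'g', 'h', 'i', 'j', '4', '5', '6'],
   ['k', 'l', 'm', 'n', 'o', '7', '8', '9'],
   ['p', 'q', 'r', 's', 't', '.', '@', '0'],
   ['u', 'v', 'w', 'x', 'y', 'z', '_', '/']]

-- get_indexes: scan enumerate(REMOTE); none = the Python falls off and returns None
def getIndexesAux (rows : List (Int × List Char)) (letter : Char) : Option (Int × Int) :=
  match rows with
  | [] => none
  | (i, row) :: rest =>
    if letter ∈ row then some (i, ((PySem.List.index? row letter).getD 0 : Nat)) -- row.index; in-range since letter ∈ row
    else getIndexesAux rest letter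

def get_indexes (letter : Char) : Option (Int × Int) :=
  getIndexesAux (PySem.List.enumerate pvREMOTE) letter

-- A's second loop: pop(0) from both lists, walking the cursor (default (0,0) unreachable under Pre_)
def pvTvLoopA (xs ys : List Int) (cx cy moves : Int) : Int :=
  match xs, ys with
  | x :: xs', y :: ys' =>
    let mx := x - cx
    let my := y - cy
    pvTvLoopA xs' ys' x y (moves + (if mx ≥ 0 then mx else mx * -1) + (if my ≥ 0 then my else my * -1) + 1)
  | _, _ => moves

def tv_remote (word : String) : Int :=
  let lists := word.toList.foldl (fun (acc : List Int × List Int) letter =>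
    let yx := (get_indexes letter).getD (0, 0)   -- default unreachable under Pre_
    (acc.1 ++ [yx.2], acc.2 ++ [yx.1])) ([], [])
  pvTvLoopA lists.1 lists.2 0 0 0

-- ===== PORT B =====
-- POS = {ch: (r, c) for r, row in enumerate(REMOTE) for c, ch in enumerate(row)}
def pvPOS : PySem.Dict Char (Int × Int) :=
  PySem.Dict.ofList ((PySem.List.enumerate pvREMOTE).flatMap (fun ri =>
    (PySem.List.enumerate ri.2).map (fun ci => ((ci.2, (ri.1, ci.1)) : Char × (Int × Int)))))

def tv_remote_alt (word : String) : Int :=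
  let positions := (0, 0) :: word.toList.map (fun ch => (PySem.Dict.get? pvPOS ch).getD (0, 0)) -- default unreachable under Pre_
  let travel := ((positions.zip (positions.drop 1)).map
    (fun p => |p.2.1 - p.1.1| + |p.2.2 - p.1.2|)).sum
  travel + (word.toList.length : Int)

-- ===== PRECONDITION & SPEC =====
-- A raises TypeError (unpacking None) on any character not on the remote; B raises KeyError there; Pre_ admits exactly the words of remote characters.
def Pre_tv_remote (word : String) : Prop :=
  word.toList.all (fun c => pvREMOTE.any (fun row => c ∈ row)) = true
instance (word : String) : Decidable (Pre_tv_remote word) := by unfold Pre_tv_remote; infer_instance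
def pvWitness_tv_remote : String := "codewars"
def Spec_tv_remote (word : String) (out : Int) : Prop := out = tv_remote_alt word
instance (word : String) (out : Int) : Decidable (Spec_tv_remote word out) := by unfold Spec_tv_remote; infer_instance

-- ===== CLAIM (what is proved, stated in full; the proofs are below) =====
def Claim_equal_tv_remote : Prop := ∀ (word : String), Dom_tv_remote word → Pre_tv_remote word → Spec_tv_remote word (tv_remote word)

-- ===== LEMMAS AND PROOFS =====

-- the two lookups agree on every remote character (finite check over the 40 keys)
lemma lookup_agree_flatten : ∀ c' ∈ pvREMOTE.flatten, get_indexes c' = PySem.Dict.get? pvPOS c' := by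
  intro c hc
  fin_cases hc <;> rfl

lemma lookup_agree : ∀ c, (pvREMOTE.any (fun row => c ∈ row) = true) →
    get_indexes c = PySem.Dict.get? pvPOS c := by
  intro c hc
  simp only [List.any_eq_true] at hc
  obtain ⟨row, hrow, hm⟩ := hc
  exact lookup_agree_flatten c (List.mem_flatten.mpr ⟨row, hrow, by simpa using hm⟩)

-- A's first loop builds exactly the two projected lists
lemma build_lists (l : List Char) (f : Char → Int × Int) :
    ∀ (xs ys : List Int),
      l.foldl (fun (acc : List Int × List Int) letter =>
        ((acc.1 ++ [(f letter).2], acc.2 ++ [(f letter).1]))) (xs, ys)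
      = (xs ++ l.map (fun c => (f c).2), ys ++ l.map (fun c => (f c).1)) := by
  induction l with
  | nil => simp
  | cons a t ih => intro xs ys; simp [List.foldl_cons, ih]

def pvPairSum : List (Int × Int) → Int
  | p :: q :: rest => (|q.1 - p.1| + |q.2 - p.2|) + pvPairSum (q :: rest)
  | _ => 0

lemma pairSum_eq (ps : List (Int × Int)) :
    ((ps.zip (ps.drop 1)).map (fun p => |p.2.1 - p.1.1| + |p.2.2 - p.1.2|)).sum
      = pvPairSum ps := by
  match ps with
  | [] => simp [pvPairSum]
  | [p] => simp [pvPairSum]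
  | p :: q :: rest =>
    have := pairSum_eq (q :: rest)
    simp only [List.drop_succ_cons, List.drop_zero, List.zip_cons_cons, List.map_cons,
      List.sum_cons, pvPairSum] at *
    omega

-- A's cursor loop equals the pairwise sum from the current position, plus one keypress per letter
lemma loop_eq (l : List (Int × Int)) :
    ∀ (cx cy m : Int),
      pvTvLoopA (l.map (·.2)) (l.map (·.1)) cx cy m
        = m + pvPairSum ((cy, cx) :: l) + l.length := by
  induction l with
  | nil => intro cx cy m; simp [pvTvLoopA, pvPairSum]
  | cons p t ih =>
    intro cx cy m
    simp only [List.map_cons, pvTvLoopA, pvPairSum]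
    rw [ih]
    have h1 : (if p.2 - cx ≥ 0 then p.2 - cx else (p.2 - cx) * -1) = |p.2 - cx| := by
      rcases abs_cases (p.2 - cx) with ⟨h, _⟩ | ⟨h, _⟩ <;> rw [h] <;> split_ifs <;> omega
    have h2 : (if p.1 - cy ≥ 0 then p.1 - cy else (p.1 - cy) * -1) = |p.1 - cy| := by
      rcases abs_cases (p.1 - cy) with ⟨h, _⟩ | ⟨h, _⟩ <;> rw [h] <;> split_ifs <;> omega
    rw [h1, h2]
    simp only [List.length_cons]
    push_cast
    ring

-- ===== VERDICT (by name: the statement is the Claim_ definition above) =====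
theorem tv_remote_spec : Claim_equal_tv_remote := by
  intro word _ hpre
  unfold Spec_tv_remote tv_remote tv_remote_alt
  have hlk : ∀ c ∈ word.toList,
      (get_indexes c).getD (0, 0) = (PySem.Dict.get? pvPOS c).getD (0, 0) := by
    intro c hc
    rw [lookup_agree c (by
      unfold Pre_tv_remote at hpre
      simp only [List.all_eq_true] at hpre
      exact hpre c hc)]
  set g : Char → Int × Int := fun c => (get_indexes c).getD (0, 0) with hg
  set f : Char → Int × Int := fun c => (PySem.Dict.get? pvPOS c).getD (0, 0) with hf
  have hmapeq : word.toList.map g = word.toList.map f :=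
    List.map_congr_left (fun c hc => by rw [hg, hf]; exact hlk c hc)
  have hfold := build_lists word.toList g [] []
  simp only [List.nil_append] at hfold
  simp only [hg] at hfold
  rw [hfold]
  have hx : word.toList.map (fun c => (g c).2) = (word.toList.map f).map (·.2) := by
    rw [← hmapeq, List.map_map]; rfl
  have hy : word.toList.map (fun c => (g c).1) = (word.toList.map f).map (·.1) := by
    rw [← hmapeq, List.map_map]; rfl
  rw [hx, hy, loop_eq, ← pairSum_eq ((0, 0) :: word.toList.map f)]
  simp
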